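-- pv_equiv track=rewrite | github.com/jdoeun/Algorithm-Study | iceprins/241114/PGS_억억단을_외우자.py | solution
-- ===== SOURCE A (Python) =====
-- def get_aliquots(n):
--     aliquots = [0] * (n + 1)
--     for i in range(1, int(n ** 0.5) + 1):
--         aliquots[i * i] += 1
--         # i를 약수로 갖는 가장 작은 수가 i * (i + 1)
--         for j in range(i * (i + 1), n + 1, i):
--             aliquots[j] += 2
--     return aliquots
--
-- def solution(e, starts):
--     aliquot_cnt = get_aliquots(e)
--
--     freq = [0] * (e + 1)
--     max_aliquot = e
--
--     for i in range(e, 0, -1):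
--         if aliquot_cnt[i] >= aliquot_cnt[max_aliquot]:
--             max_aliquot = i
--         freq[i] = max_aliquot
--
--     return [freq[s] for s in starts]
-- ===== SOURCE B (Python) =====
-- def solution(e, starts):
--     # Count divisors with the plain harmonic sieve: every d marks all of its
--     # multiples once, instead of A's sqrt-paired sieve.
--     cnt = [0] * (e + 1)
--     for d in range(1, e + 1):
--         for j in range(d, e + 1, d):
--             cnt[j] += 1
--
--     # Suffix arg-max collected back-to-front into a list, then reversed,
--     # instead of A's in-place writes into a preallocated array.
--     best = e
--     suffix = []
--     for i in range(e, 0, -1):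
--         if cnt[i] >= cnt[best]:
--             best = i
--         suffix.append(best)
--     freq = [0] + suffix[::-1]
--
--     return [freq[s] for s in starts]
-- ===== Notes on version B (the rewrite author's own statement) =====
-- stated objective: simpler
-- what changed: Replaces A's sqrt-paired divisor sieve (i*i gets +1, multiples from i*(i+1) get +2) with the plain harmonic divisor-count sieve (every d from 1 to e marks each of its multiples once), and builds the suffix arg-max table by appending to a list and reversing it instead of writing into a preallocated array.
import Mathlib
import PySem

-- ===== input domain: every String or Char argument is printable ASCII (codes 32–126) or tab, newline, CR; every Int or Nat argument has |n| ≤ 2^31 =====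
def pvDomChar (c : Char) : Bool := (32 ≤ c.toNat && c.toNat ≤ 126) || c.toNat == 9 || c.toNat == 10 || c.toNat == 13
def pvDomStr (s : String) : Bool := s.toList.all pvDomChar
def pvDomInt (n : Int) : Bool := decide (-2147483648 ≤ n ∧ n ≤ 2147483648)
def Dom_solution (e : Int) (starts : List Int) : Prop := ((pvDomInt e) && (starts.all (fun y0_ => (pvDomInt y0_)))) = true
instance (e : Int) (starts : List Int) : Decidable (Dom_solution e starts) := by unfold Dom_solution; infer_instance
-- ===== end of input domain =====

-- B replaces A's sqrt-paired divisor sieve by the plain harmonic divisor-count sieve and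
-- collects the suffix arg-max into an appended-then-reversed list (objective: simpler; not faster).

-- ===== PORT A =====
-- int(n ** 0.5) is ported as Nat.sqrt n.toNat: exact for 0 ≤ n ≤ 2^31 (float sqrt is correctly
-- rounded there, so truncation agrees with the integer square root).
def get_aliquots (n : Int) : Array Int :=
  (PySem.List.pyRange 1 ((Nat.sqrt n.toNat : Int) + 1) 1).foldl
    (fun a i =>
      let a1 := a.setIfInBounds (i*i).toNat (a.getD (i*i).toNat 0 + 1)
      (PySem.List.pyRange (i * (i + 1)) (n + 1) i).foldl
        (fun b j => b.setIfInBounds j.toNat (b.getD j.toNat 0 + 2)) a1)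
    (Array.replicate (n + 1).toNat (0 : Int))

def solution (e : Int) (starts : List Int) : List Int :=
  let aliquot_cnt := get_aliquots e
  let st := (PySem.List.pyRange e 0 (-1)).foldl
      (fun (st : Array Int × Int) i =>
        let m := if aliquot_cnt.getD i.toNat 0 ≥ aliquot_cnt.getD st.2.toNat 0 then i else st.2
        (st.1.setIfInBounds i.toNat m, m))
      (Array.replicate (e + 1).toNat (0 : Int), e)
  let freq := st.1.toList
  starts.map (fun s => PySem.List.pyGetD freq s 0)

-- ===== PORT B =====
def solution_alt (e : Int) (starts : List Int) : List Int :=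
  let cnt := (PySem.List.pyRange 1 (e + 1) 1).foldl
      (fun a d =>
        (PySem.List.pyRange d (e + 1) d).foldl
          (fun b j => b.setIfInBounds j.toNat (b.getD j.toNat 0 + 1)) a)
      (Array.replicate (e + 1).toNat (0 : Int))
  let st := (PySem.List.pyRange e 0 (-1)).foldl
      (fun (st : Int × Array Int) i =>
        let b := if cnt.getD i.toNat 0 ≥ cnt.getD st.1.toNat 0 then i else st.1
        (b, st.2.push b))
      (e, (#[] : Array Int))
  let freq := (0 : Int) :: st.2.toList.reverse
  starts.map (fun s => PySem.List.pyGetD freq s 0)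

-- ===== PRECONDITION & SPEC =====
-- Pre: exactly the inputs where Python A returns normally: e < 0 makes `int(e ** 0.5)` a complex
-- power (TypeError), and a start outside [-(e+1), e] raises IndexError in `freq[s]`.
def Pre_solution (e : Int) (starts : List Int) : Prop :=
  0 ≤ e ∧ ∀ s ∈ starts, -(e + 1) ≤ s ∧ s ≤ e
instance (e : Int) (starts : List Int) : Decidable (Pre_solution e starts) := by
  unfold Pre_solution; infer_instance

def pvWitness_solution : Int × List Int := (6, [1, 2, 3, 6, -1, -7])

def Spec_solution (e : Int) (starts : List Int) (out : List Int) : Prop := out = solution_alt e starts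
instance (e : Int) (starts : List Int) (out : List Int) : Decidable (Spec_solution e starts out) := by
  unfold Spec_solution; infer_instance

-- ===== CLAIM (what is proved, stated in full; the proofs are below) =====
def Claim_equal_solution : Prop := ∀ (e : Int) (starts : List Int), Dom_solution e starts → Pre_solution e starts → Spec_solution e starts (solution e starts)

-- ===== LEMMAS AND PROOFS =====

-- A sieve loop as a flat list of (position, increment) operations.
def applyOps (ops : List (Nat × Int)) (a : List Int) : List Int :=
  ops.foldl (fun b pc => b.set pc.1 (b.getD pc.1 0 + pc.2)) a

def opsA (n : Nat) : List (Nat × Int) :=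
  (List.range (Nat.sqrt n)).flatMap (fun t =>
    ((t+1)*(t+1), (1:Int)) ::
      (PySem.List.pyRange (((t:Int)+1) * ((t:Int)+2)) ((n:Int)+1) ((t:Int)+1)).map
        (fun j => (j.toNat, (2:Int))))

def opsB (n : Nat) : List (Nat × Int) :=
  (List.range n).flatMap (fun (t : Nat) =>
    (PySem.List.pyRange ((t:Int)+1) ((n:Int)+1) ((t:Int)+1)).map (fun j => (j.toNat, (1:Int))))

theorem applyOps_length (ops : List (Nat × Int)) (a : List Int) :
    (applyOps ops a).length = a.length := by
  induction ops generalizing a with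
  | nil => rfl
  | cons pc ops ih =>
      simp only [applyOps, List.foldl_cons]
      rw [show (List.foldl (fun b pc => b.set pc.1 (b.getD pc.1 0 + pc.2))
            (a.set pc.1 (a.getD pc.1 0 + pc.2)) ops)
          = applyOps ops (a.set pc.1 (a.getD pc.1 0 + pc.2)) from rfl,
        ih]
      simp

theorem applyOps_getD (ops : List (Nat × Int)) (a : List Int) (k : Nat)
    (h : ∀ pc ∈ ops, pc.1 < a.length) :
    (applyOps ops a).getD k 0 =
      a.getD k 0 + ((ops.map (fun pc => if pc.1 = k then pc.2 else 0)).sum) := by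
  induction ops generalizing a with
  | nil => simp [applyOps]
  | cons pc ops ih =>
      have hpc : pc.1 < a.length := h pc (by simp)
      have h' : ∀ q ∈ ops, q.1 < (a.set pc.1 (a.getD pc.1 0 + pc.2)).length := by
        intro q hq; simpa using h q (List.mem_cons_of_mem _ hq)
      have := ih (a.set pc.1 (a.getD pc.1 0 + pc.2)) h'
      simp only [applyOps, List.foldl_cons] at this ⊢
      rw [this]
      by_cases hk : pc.1 = k
      · subst hk
        simp [List.getD_eq_getElem?_getD, hpc]
        ring
      · simp [List.getD_eq_getElem?_getD, hk]

theorem foldl_toList_hom (L : List Int) (step : Array Int → Int → Array Int)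
    (stepL : List Int → Int → List Int) (a0 : Array Int)
    (h : ∀ (a : Array Int) (x : Int), (step a x).toList = stepL a.toList x) :
    (L.foldl step a0).toList = L.foldl stepL a0.toList := by
  induction L generalizing a0 with
  | nil => rfl
  | cons x L ih => simp only [List.foldl_cons, ih, h]

theorem arr_getD (a : Array Int) (p : Nat) (d : Int) : a.getD p d = a.toList.getD p d := by
  rw [List.getD_eq_getElem?_getD, Array.getElem?_toList, Array.getD_eq_getD_getElem?]

theorem get_aliquots_toList (n : Nat) :
    (get_aliquots (n : Int)).toList
      = (PySem.List.pyRange 1 ((Nat.sqrt (n:Int).toNat : Int) + 1) 1).foldl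
        (fun a i =>
          (PySem.List.pyRange (i * (i + 1)) ((n:Int) + 1) i).foldl
            (fun b j => b.set j.toNat (b.getD j.toNat 0 + 2))
            (a.set (i*i).toNat (a.getD (i*i).toNat 0 + 1)))
        (List.replicate ((n:Int) + 1).toNat (0 : Int)) := by
  unfold get_aliquots
  rw [← Array.toList_replicate (n := ((n:Int)+1).toNat) (a := (0:Int))]
  apply foldl_toList_hom
  intro a x
  dsimp only
  rw [foldl_toList_hom _ _ (fun b j => b.set j.toNat (b.getD j.toNat 0 + 2)) _
      (fun b j => by rw [Array.toList_setIfInBounds, arr_getD])]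
  rw [Array.toList_setIfInBounds, arr_getD]

theorem listSieveA_eq_applyOps (n : Nat) :
    ((PySem.List.pyRange 1 ((Nat.sqrt (n:Int).toNat : Int) + 1) 1).foldl
        (fun a i =>
          (PySem.List.pyRange (i * (i + 1)) ((n:Int) + 1) i).foldl
            (fun b j => b.set j.toNat (b.getD j.toNat 0 + 2))
            (a.set (i*i).toNat (a.getD (i*i).toNat 0 + 1)))
        (List.replicate ((n:Int) + 1).toNat (0 : Int)))
      = applyOps (opsA n) (List.replicate (n+1) (0:Int)) := by
  unfold opsA applyOps
  rw [List.foldl_flatMap, PySem.List.pyRange_one]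
  have hb : ((((Nat.sqrt (n:Int).toNat : Nat) : Int) + 1) - 1).toNat = Nat.sqrt n := by simp
  rw [hb, List.foldl_map]
  have hrep : ((n:Int)+1).toNat = n+1 := by omega
  rw [hrep]
  apply PySem.List.foldl_congr_mem
  intro a t _
  simp only [List.foldl_cons, List.foldl_map]
  have h1 : (1 + (t:Int)) = ((t:Int) + 1) := by ring
  have h2 : ((t:Int)+1) * (((t:Int)+1) + 1) = ((t:Int)+1) * ((t:Int)+2) := by ring
  have h3 : (((t:Int)+1) * ((t:Int)+1)).toNat = (t+1)*(t+1) := by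
    rw [show ((t:Int)+1) * ((t:Int)+1) = (((t+1)*(t+1) : Nat) : Int) by push_cast; ring]
    exact Int.toNat_natCast _
  rw [h1, h2, h3]

theorem cntB_toList (n : Nat) :
    ((PySem.List.pyRange 1 ((n:Int) + 1) 1).foldl
      (fun a d =>
        (PySem.List.pyRange d ((n:Int) + 1) d).foldl
          (fun b j => b.setIfInBounds j.toNat (b.getD j.toNat 0 + 1)) a)
      (Array.replicate (n + 1) (0 : Int))).toList
    = (PySem.List.pyRange 1 ((n:Int) + 1) 1).foldl
      (fun a d =>
        (PySem.List.pyRange d ((n:Int) + 1) d).foldl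
          (fun b j => b.set j.toNat (b.getD j.toNat 0 + 1)) a)
      (List.replicate (n + 1) (0 : Int)) := by
  rw [← Array.toList_replicate (n := n+1) (a := (0:Int))]
  apply foldl_toList_hom
  intro a x
  exact foldl_toList_hom _ _ (fun b j => b.set j.toNat (b.getD j.toNat 0 + 1)) _
    (fun b j => by rw [Array.toList_setIfInBounds, arr_getD])

theorem cntB_eq_applyOps (n : Nat) :
    (PySem.List.pyRange 1 ((n:Int) + 1) 1).foldl
      (fun a d =>
        (PySem.List.pyRange d ((n:Int) + 1) d).foldl
          (fun b j => b.set j.toNat (b.getD j.toNat 0 + 1)) a)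
      (List.replicate (n + 1) (0 : Int))
    = applyOps (opsB n) (List.replicate (n+1) (0:Int)) := by
  unfold opsB applyOps
  rw [List.foldl_flatMap, PySem.List.pyRange_one]
  have hb : (((n:Int) + 1) - 1).toNat = n := by omega
  rw [hb, List.foldl_map]
  apply PySem.List.foldl_congr_mem
  intro a t _
  simp only [List.foldl_map]
  have h1 : (1 + (t:Int)) = ((t:Int) + 1) := by ring
  rw [h1]

theorem opsA_pos_lt (n : Nat) : ∀ pc ∈ opsA n, pc.1 < n + 1 := by
  intro pc hpc
  unfold opsA at hpc
  rw [List.mem_flatMap] at hpc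
  obtain ⟨t, ht, hmem⟩ := hpc
  rw [List.mem_range] at ht
  rcases List.mem_cons.mp hmem with h | h
  · subst h
    have : t + 1 ≤ Nat.sqrt n := ht
    have := Nat.le_sqrt.mp this
    simpa using by omega
  · rw [List.mem_map] at h
    obtain ⟨j, hj, hje⟩ := h
    rw [PySem.List.mem_pyRange_iff_of_pos (by positivity)] at hj
    subst hje
    simp only
    omega

theorem opsB_pos_lt (n : Nat) : ∀ pc ∈ opsB n, pc.1 < n + 1 := by
  intro pc hpc
  unfold opsB at hpc
  rw [List.mem_flatMap] at hpc
  obtain ⟨t, _, hmem⟩ := hpc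
  rw [List.mem_map] at hmem
  obtain ⟨j, hj, hje⟩ := hmem
  rw [PySem.List.mem_pyRange_iff_of_pos (by positivity)] at hj
  subst hje
  simp only
  omega

theorem sum_flatMap_int {α : Type} (l : List α) (f : α → List Int) :
    (l.flatMap f).sum = (l.map (fun x => (f x).sum)).sum := by
  induction l with
  | nil => simp
  | cons x l ih => simp [ih]

theorem sum_map_ite_count (l : List Int) (c v : Int) :
    ((l.map (fun x => if x = c then v else 0)).sum) = v * (l.count c : Int) := by
  induction l with
  | nil => simp
  | cons x l ih =>
      by_cases h : x = c
      · subst h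
        simp [ih]
        ring
      · simp [h, ih]

theorem nodup_pyRange_pos (a b s : Int) (hs : 0 < s) : (PySem.List.pyRange a b s).Nodup := by
  rw [PySem.List.pyRange_of_pos _ _ hs]
  refine List.Nodup.map ?_ List.nodup_range
  intro x y h
  have h1 : s * (x:Int) = s * (y:Int) := by linarith
  have h2 := mul_left_cancel₀ (ne_of_gt hs) h1
  exact_mod_cast h2

theorem sum_ite_mem_pyRange (a b s c v : Int) (hs : 0 < s) :
    (((PySem.List.pyRange a b s).map (fun j => if j = c then v else 0)).sum)
      = if c ∈ PySem.List.pyRange a b s then v else 0 := by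
  rw [sum_map_ite_count]
  by_cases h : c ∈ PySem.List.pyRange a b s
  · rw [List.count_eq_one_of_mem (nodup_pyRange_pos a b s hs) h, if_pos h]; simp
  · rw [List.count_eq_zero_of_not_mem h, if_neg h]; simp

theorem finset_sum_ite_card (s : Finset ℕ) (p : ℕ → Prop) [DecidablePred p] (c : Int) :
    (∑ d ∈ s, if p d then c else 0) = c * (((s.filter p).card : Nat) : Int) := by
  rw [← Finset.sum_filter]
  simp [mul_comm]

theorem sum_map_range_int (f : Nat → Int) (n : Nat) :
    ((List.range n).map f).sum = ∑ i ∈ Finset.range n, f i := by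
  induction n with
  | zero => simp
  | succ n ih => simp [List.range_succ, Finset.sum_range_succ, ih]

def Gterm (k d : Nat) : Int :=
  (if d*d = k then 1 else 0) + (if d ∣ k ∧ d*(d+1) ≤ k then 2 else 0)

def Hterm (k d : Nat) : Int := if d ∣ k ∧ d ≤ k then 1 else 0

theorem sumA_eq (n k : Nat) (hk : k ≤ n) :
    ((opsA n).map (fun pc => if pc.1 = k then pc.2 else 0)).sum
      = ∑ t ∈ Finset.range (Nat.sqrt n), Gterm k (t+1) := by
  unfold opsA
  rw [List.map_flatMap, sum_flatMap_int, ← sum_map_range_int]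
  congr 1
  apply List.map_congr_left
  intro t _
  simp only [List.map_cons, List.sum_cons, List.map_map]
  have hpos : (0:Int) < (t:Int) + 1 := by positivity
  have hconv : ((PySem.List.pyRange (((t:Int)+1) * ((t:Int)+2)) ((n:Int)+1) ((t:Int)+1)).map
        ((fun pc : Nat × Int => if pc.1 = k then pc.2 else 0) ∘ (fun j => (j.toNat, (2:Int)))))
      = ((PySem.List.pyRange (((t:Int)+1) * ((t:Int)+2)) ((n:Int)+1) ((t:Int)+1)).map
        (fun j => if j = (k:Int) then (2:Int) else 0)) := by
    apply List.map_congr_left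
    intro j hj
    rw [PySem.List.mem_pyRange_iff_of_pos hpos] at hj
    simp only [Function.comp]
    have hj0 : 0 < j := by nlinarith [hj.1]
    have : (j.toNat = k) ↔ (j = (k:Int)) := by omega
    rw [if_congr this rfl rfl]
  rw [hconv, sum_ite_mem_pyRange _ _ _ _ _ hpos]
  have hmem : ((k:Int) ∈ PySem.List.pyRange (((t:Int)+1) * ((t:Int)+2)) ((n:Int)+1) ((t:Int)+1))
      ↔ ((t+1) ∣ k ∧ (t+1)*(t+1+1) ≤ k) := by
    rw [PySem.List.mem_pyRange_iff_of_pos hpos]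
    constructor
    · rintro ⟨h1, -, h3⟩
      rw [dvd_sub_left (dvd_mul_right _ _)] at h3
      constructor
      · exact_mod_cast h3
      · exact_mod_cast h1
    · rintro ⟨h1, h2⟩
      refine ⟨by exact_mod_cast h2, by exact_mod_cast (by omega : (k:Int) < (n:Int) + 1), ?_⟩
      rw [dvd_sub_left (dvd_mul_right _ _)]
      exact_mod_cast h1
  unfold Gterm
  rw [if_congr hmem rfl rfl]

theorem sumB_eq (n k : Nat) (hk : k ≤ n) :
    ((opsB n).map (fun pc => if pc.1 = k then pc.2 else 0)).sum
      = ∑ t ∈ Finset.range n, Hterm k (t+1) := by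
  unfold opsB
  rw [List.map_flatMap, sum_flatMap_int, ← sum_map_range_int]
  congr 1
  apply List.map_congr_left
  intro t _
  simp only [List.map_map]
  have hpos : (0:Int) < (t:Int) + 1 := by positivity
  have hconv : ((PySem.List.pyRange ((t:Int)+1) ((n:Int)+1) ((t:Int)+1)).map
        ((fun pc : Nat × Int => if pc.1 = k then pc.2 else 0) ∘ (fun j => (j.toNat, (1:Int)))))
      = ((PySem.List.pyRange ((t:Int)+1) ((n:Int)+1) ((t:Int)+1)).map
        (fun j => if j = (k:Int) then (1:Int) else 0)) := by
    apply List.map_congr_left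
    intro j hj
    rw [PySem.List.mem_pyRange_iff_of_pos hpos] at hj
    simp only [Function.comp]
    have hj0 : 0 < j := by omega
    have : (j.toNat = k) ↔ (j = (k:Int)) := by omega
    rw [if_congr this rfl rfl]
  rw [hconv, sum_ite_mem_pyRange _ _ _ _ _ hpos]
  have hmem : ((k:Int) ∈ PySem.List.pyRange ((t:Int)+1) ((n:Int)+1) ((t:Int)+1))
      ↔ ((t+1) ∣ k ∧ (t+1) ≤ k) := by
    rw [PySem.List.mem_pyRange_iff_of_pos hpos]
    constructor
    · rintro ⟨h1, -, h3⟩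
      rw [dvd_sub_left dvd_rfl] at h3
      exact ⟨by exact_mod_cast h3, by exact_mod_cast h1⟩
    · rintro ⟨h1, h2⟩
      refine ⟨by exact_mod_cast h2, by exact_mod_cast (by omega : (k:Int) < (n:Int) + 1), ?_⟩
      rw [dvd_sub_left dvd_rfl]
      exact_mod_cast h1
  unfold Hterm
  rw [if_congr hmem rfl rfl]

theorem div_sq_lt_iff (k d : Nat) (hk : 0 < k) (hd : d ∈ k.divisors) :
    (k / d) * (k / d) < k ↔ k < d * d := by
  obtain ⟨hdvd, -⟩ := Nat.mem_divisors.mp hd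
  have hdpos : 0 < d := Nat.pos_of_mem_divisors hd
  obtain ⟨m, hm⟩ := hdvd
  have hmpos : 0 < m := by
    rcases Nat.eq_zero_or_pos m with h | h
    · subst h; omega
    · exact h
  have hq : k / d = m := by rw [hm, Nat.mul_div_cancel_left m hdpos]
  rw [hq, hm]
  constructor
  · intro h
    have hmd : m < d := Nat.lt_of_mul_lt_mul_right h
    nlinarith
  · intro h
    have hmd : m < d := Nat.lt_of_mul_lt_mul_left h
    nlinarith

theorem card_gt_eq_card_lt (k : Nat) (hk : 0 < k) :
    (k.divisors.filter (fun d => k < d*d)).card = (k.divisors.filter (fun d => d*d < k)).card := by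
  have h := Nat.sum_div_divisors (α := ℕ) k (fun d => if d*d < k then 1 else 0)
  have h2 : (∑ d ∈ k.divisors, (if (k/d)*(k/d) < k then (1:ℕ) else 0))
      = ∑ d ∈ k.divisors, (if k < d*d then (1:ℕ) else 0) :=
    Finset.sum_congr rfl (fun d hd => by rw [if_congr (div_sq_lt_iff k d hk hd) rfl rfl])
  rw [h2] at h
  have e1 := Finset.sum_boole (fun d => k < d*d) k.divisors (R := ℕ)
  have e2 := Finset.sum_boole (fun d => d*d < k) k.divisors (R := ℕ)
  simp only [Nat.cast_id] at e1 e2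
  calc (k.divisors.filter (fun d => k < d*d)).card
      = ∑ d ∈ k.divisors, (if k < d*d then (1:ℕ) else 0) := e1.symm
    _ = ∑ d ∈ k.divisors, (if d*d < k then (1:ℕ) else 0) := h
    _ = (k.divisors.filter (fun d => d*d < k)).card := e2

theorem divisors_card_split (k : Nat) (hk : 0 < k) :
    k.divisors.card = (k.divisors.filter (fun d => d*d = k)).card
      + 2 * (k.divisors.filter (fun d => d*d < k)).card := by
  have t1 := Finset.filter_card_add_filter_neg_card_eq_card
    (s := k.divisors) (p := fun d => d*d < k)
  have t2 := Finset.filter_card_add_filter_neg_card_eq_card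
    (s := k.divisors.filter (fun d => ¬ d*d < k)) (p := fun d => d*d = k)
  have e1 : (k.divisors.filter (fun d => ¬ d*d < k)).filter (fun d => d*d = k)
      = k.divisors.filter (fun d => d*d = k) := by
    rw [Finset.filter_filter]
    apply Finset.filter_congr
    intro d _
    constructor
    · exact fun h => h.2
    · exact fun h => ⟨by omega, h⟩
  have e2 : (k.divisors.filter (fun d => ¬ d*d < k)).filter (fun d => ¬ d*d = k)
      = k.divisors.filter (fun d => k < d*d) := by
    rw [Finset.filter_filter]
    apply Finset.filter_congr
    intro d _
    generalize d*d = x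
    omega
  rw [e1, e2, card_gt_eq_card_lt k hk] at t2
  omega

theorem sum_opsA_eq_sum_opsB (n k : Nat) (hk : k ≤ n) :
    ((opsA n).map (fun pc => if pc.1 = k then pc.2 else 0)).sum
      = ((opsB n).map (fun pc => if pc.1 = k then pc.2 else 0)).sum := by
  rw [sumA_eq n k hk, sumB_eq n k hk]
  by_cases hk0 : k = 0
  · subst hk0
    rw [Finset.sum_eq_zero, Finset.sum_eq_zero]
    · intro t _
      unfold Hterm
      rw [if_neg (by omega)]
    · intro t _
      unfold Gterm
      have h1 : (t+1)*(t+1) ≠ 0 := Nat.mul_ne_zero (by omega) (by omega)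
      have h2 : ¬ ((t+1)*(t+1+1) ≤ 0) := by
        have : 0 < (t+1)*(t+1+1) := Nat.mul_pos (by omega) (by omega)
        omega
      rw [if_neg h1, if_neg (by exact fun h => h2 h.2)]
      simp
  · have hk1 : 0 < k := by omega
    -- extend both sums by a vanishing 0 term
    have hG0 : Gterm k 0 = 0 := by
      unfold Gterm
      rw [if_neg (by omega), if_neg (by rintro ⟨h, -⟩; exact hk0 (Nat.eq_zero_of_zero_dvd h))]
      simp
    have hH0 : Hterm k 0 = 0 := by
      unfold Hterm
      rw [if_neg (by rintro ⟨h, -⟩; exact hk0 (Nat.eq_zero_of_zero_dvd h))]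
    have hGA : (∑ t ∈ Finset.range (Nat.sqrt n), Gterm k (t+1))
        = ∑ d ∈ Finset.range (Nat.sqrt n + 1), Gterm k d := by
      rw [Finset.sum_range_succ' (Gterm k) (Nat.sqrt n), hG0, add_zero]
    have hHB : (∑ t ∈ Finset.range n, Hterm k (t+1))
        = ∑ d ∈ Finset.range (n + 1), Hterm k d := by
      rw [Finset.sum_range_succ' (Hterm k) n, hH0, add_zero]
    rw [hGA, hHB]
    -- filter identifications
    have feq1 : (Finset.range (Nat.sqrt n + 1)).filter (fun d => d*d = k)
        = k.divisors.filter (fun d => d*d = k) := by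
      ext d
      simp only [Finset.mem_filter, Finset.mem_range, Nat.mem_divisors]
      constructor
      · rintro ⟨-, he⟩
        exact ⟨⟨⟨d, he.symm⟩, by omega⟩, he⟩
      · rintro ⟨-, he⟩
        have : d ≤ Nat.sqrt n := Nat.le_sqrt.mpr (by omega)
        exact ⟨by omega, he⟩
    have feq2 : (Finset.range (Nat.sqrt n + 1)).filter (fun d => d ∣ k ∧ d*(d+1) ≤ k)
        = k.divisors.filter (fun d => d*d < k) := by
      ext d
      simp only [Finset.mem_filter, Finset.mem_range, Nat.mem_divisors]
      constructor
      · rintro ⟨-, hdvd, hle⟩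
        have hd0 : 0 < d := by
          rcases Nat.eq_zero_or_pos d with h | h
          · subst h; exact absurd (Nat.eq_zero_of_zero_dvd hdvd) hk0
          · exact h
        refine ⟨⟨hdvd, by omega⟩, ?_⟩
        have : d*d < d*(d+1) := by nlinarith
        omega
      · rintro ⟨⟨hdvd, -⟩, hlt⟩
        obtain ⟨m, hm⟩ := hdvd
        have hd0 : 0 < d := by
          rcases Nat.eq_zero_or_pos d with h | h
          · subst h; simp at hm; omega
          · exact h
        rw [hm] at hlt
        have hdm : d < m := Nat.lt_of_mul_lt_mul_left hlt
        refine ⟨?_, ⟨m, hm⟩, ?_⟩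
        · have hddn : d*d ≤ n := by
            have : d*d < d*m := hlt
            have hkn : d*m ≤ n := by rw [← hm]; exact hk
            omega
          have : d ≤ Nat.sqrt n := Nat.le_sqrt.mpr hddn
          omega
        · have hle : d*(d+1) ≤ d*m := Nat.mul_le_mul_left d (by omega)
          rw [hm]
          exact hle
    have feq3 : (Finset.range (n + 1)).filter (fun d => d ∣ k ∧ d ≤ k) = k.divisors := by
      ext d
      simp only [Finset.mem_filter, Finset.mem_range, Nat.mem_divisors]
      constructor
      · rintro ⟨-, hdvd, -⟩
        exact ⟨hdvd, by omega⟩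
      · rintro ⟨hdvd, -⟩
        have := Nat.le_of_dvd hk1 hdvd
        exact ⟨by omega, hdvd, this⟩
    -- evaluate both sums as cards
    unfold Gterm Hterm
    rw [Finset.sum_add_distrib]
    rw [finset_sum_ite_card, finset_sum_ite_card, finset_sum_ite_card]
    rw [feq1, feq2, feq3]
    have hsplit := divisors_card_split k hk1
    have hs2 : ((k.divisors.card : Nat) : Int)
        = (((k.divisors.filter (fun d => d*d = k)).card : Nat) : Int)
          + 2 * (((k.divisors.filter (fun d => d*d < k)).card : Nat) : Int) := by
      exact_mod_cast hsplit
    linarith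

theorem cnt_arr_eq (n : Nat) :
    get_aliquots (n : Int) =
    (PySem.List.pyRange 1 ((n:Int) + 1) 1).foldl
      (fun a d =>
        (PySem.List.pyRange d ((n:Int) + 1) d).foldl
          (fun b j => b.setIfInBounds j.toNat (b.getD j.toNat 0 + 1)) a)
      (Array.replicate (n + 1) (0 : Int)) := by
  apply Array.ext'
  rw [get_aliquots_toList, listSieveA_eq_applyOps, cntB_toList, cntB_eq_applyOps]
  apply List.ext_getElem
  · simp [applyOps_length]
  · intro k h1 h2
    have hk : k ≤ n := by
      have := h1; simp [applyOps_length] at this; omega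
    have hA := applyOps_getD (opsA n) (List.replicate (n+1) (0:Int)) k
      (by intro pc hpc; simpa using opsA_pos_lt n pc hpc)
    have hB := applyOps_getD (opsB n) (List.replicate (n+1) (0:Int)) k
      (by intro pc hpc; simpa using opsB_pos_lt n pc hpc)
    have e1 : (applyOps (opsA n) (List.replicate (n+1) (0:Int))).getD k 0
      = (applyOps (opsB n) (List.replicate (n+1) (0:Int))).getD k 0 := by
      rw [hA, hB, sum_opsA_eq_sum_opsB n k hk]
    simpa [List.getD_eq_getElem?_getD, List.getElem?_eq_getElem, h1, h2] using e1

-- The two suffix-argmax loops: A writes into a preallocated array, B appends and reverses.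
theorem loop_lemma (f : Int → Int → Int) (t : Nat) :
    ∀ (m : Int) (pre tail acc : List Int), pre.length = t + 1 → tail = acc.reverse →
    (PySem.List.pyRange (t:Int) 0 (-1)).foldl
        (fun (st : List Int × Int) i =>
          (st.1.set i.toNat (f i st.2), f i st.2)) (pre ++ tail, m)
      = (pre.take 1 ++
          (((PySem.List.pyRange (t:Int) 0 (-1)).foldl
            (fun (st : Int × List Int) i =>
              (f i st.1, st.2 ++ [f i st.1])) (m, acc)).2).reverse,
         ((PySem.List.pyRange (t:Int) 0 (-1)).foldl
            (fun (st : Int × List Int) i =>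
              (f i st.1, st.2 ++ [f i st.1])) (m, acc)).1) := by
  induction t with
  | zero =>
      intro m pre tail acc hlen htail
      rw [PySem.List.pyRange_neg_one_eq_nil (by norm_num)]
      obtain ⟨x, rfl⟩ := List.length_eq_one_iff.mp hlen
      subst htail
      simp
  | succ t ih =>
      intro m pre tail acc hlen htail
      have hcons : PySem.List.pyRange (((t+1 : Nat)) : Int) 0 (-1)
          = (((t+1 : Nat)) : Int) :: PySem.List.pyRange ((((t+1 : Nat)) : Int) - 1) 0 (-1) :=
        PySem.List.pyRange_neg_one_cons (by exact_mod_cast Nat.succ_pos t)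
      have hsub : (((t+1 : Nat)) : Int) - 1 = (t : Int) := by push_cast; ring
      rw [hsub] at hcons
      rw [hcons]
      simp only [List.foldl_cons]
      set m' := f (((t+1 : Nat)) : Int) m with hm'
      have htn : (((t+1 : Nat)) : Int).toNat = t + 1 := by omega
      have hset : (pre ++ tail).set ((((t+1 : Nat)) : Int)).toNat m'
          = pre.take (t+1) ++ ([m'] ++ tail) := by
        rw [htn]
        rw [List.set_append_left _ _ (by omega)]
        rw [List.set_eq_take_append_cons_drop]
        rw [if_pos (by omega)]
        have : pre.drop (t+1+1) = [] := by
          apply List.drop_eq_nil_of_le; omega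
        simp [this]
      have := ih m' (pre.take (t+1)) ([m'] ++ tail) (acc ++ [m'])
        (by simp; omega) (by simp [htail])
      simp only [hm'] at this ⊢
      rw [hset, this]
      rw [List.take_take]
      norm_num

-- ===== VERDICT (by name: the statement is the Claim_ definition above) =====
theorem solution_spec : Claim_equal_solution := by
  unfold Claim_equal_solution
  intro e starts _ hpre
  unfold Spec_solution
  obtain ⟨he, -⟩ := hpre
  obtain ⟨n, rfl⟩ : ∃ n : Nat, e = (n:Int) := ⟨e.toNat, (Int.toNat_of_nonneg he).symm⟩
  unfold solution solution_alt
  simp only [show ((n:Int)+1).toNat = n+1 from by omega, cnt_arr_eq n]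
  set C := (PySem.List.pyRange 1 ((n:Int) + 1) 1).foldl
      (fun a d =>
        (PySem.List.pyRange d ((n:Int) + 1) d).foldl
          (fun b j => b.setIfInBounds j.toNat (b.getD j.toNat 0 + 1)) a)
      (Array.replicate (n + 1) (0 : Int)) with hC
  set f : Int → Int → Int :=
    fun i m => if C.getD i.toNat 0 ≥ C.getD m.toNat 0 then i else m with hf
  -- list-level images of the two array folds
  have hA := List.foldl_hom (f := fun st : Array Int × Int => (st.1.toList, st.2))
    (g₁ := fun (st : Array Int × Int) i => (st.1.setIfInBounds i.toNat (f i st.2), f i st.2))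
    (g₂ := fun (st : List Int × Int) i => (st.1.set i.toNat (f i st.2), f i st.2))
    (l := PySem.List.pyRange (n:Int) 0 (-1))
    (init := (Array.replicate (n + 1) (0 : Int), (n:Int)))
    (by intro st y; simp [Array.toList_setIfInBounds])
  have hB := List.foldl_hom (f := fun st : Int × Array Int => (st.1, st.2.toList))
    (g₁ := fun (st : Int × Array Int) i => (f i st.1, st.2.push (f i st.1)))
    (g₂ := fun (st : Int × List Int) i => (f i st.1, st.2 ++ [f i st.1]))
    (l := PySem.List.pyRange (n:Int) 0 (-1))
    (init := ((n:Int), (#[] : Array Int)))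
    (by intro st y; simp [Array.toList_push])
  have hl := loop_lemma f n (n:Int) (List.replicate (n+1) (0:Int)) [] []
    (by simp) (by simp)
  rw [List.append_nil] at hl
  have htake : (List.replicate (n+1) (0:Int)).take 1 = [(0:Int)] := by
    rw [List.take_replicate]; norm_num
  -- freq of A equals freq of B
  have hfreq :
      ((PySem.List.pyRange (n:Int) 0 (-1)).foldl
        (fun (st : Array Int × Int) i => (st.1.setIfInBounds i.toNat (f i st.2), f i st.2))
        (Array.replicate (n + 1) (0 : Int), (n:Int))).1.toList
      = (0 : Int) ::
        ((PySem.List.pyRange (n:Int) 0 (-1)).foldl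
          (fun (st : Int × Array Int) i => (f i st.1, st.2.push (f i st.1)))
          ((n:Int), (#[] : Array Int))).2.toList.reverse := by
    have h1 : ((PySem.List.pyRange (n:Int) 0 (-1)).foldl
        (fun (st : Array Int × Int) i => (st.1.setIfInBounds i.toNat (f i st.2), f i st.2))
        (Array.replicate (n + 1) (0 : Int), (n:Int))).1.toList
      = ((PySem.List.pyRange (n:Int) 0 (-1)).foldl
        (fun (st : List Int × Int) i => (st.1.set i.toNat (f i st.2), f i st.2))
        (List.replicate (n + 1) (0:Int), (n:Int))).1 := by
      simp only [Array.toList_replicate] at hA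
      rw [hA]
    have h2 : ((PySem.List.pyRange (n:Int) 0 (-1)).foldl
        (fun (st : Int × Array Int) i => (f i st.1, st.2.push (f i st.1)))
        ((n:Int), (#[] : Array Int))).2.toList
      = ((PySem.List.pyRange (n:Int) 0 (-1)).foldl
        (fun (st : Int × List Int) i => (f i st.1, st.2 ++ [f i st.1]))
        ((n:Int), ([] : List Int))).2 := by
      simp only [] at hB
      rw [hB]
    rw [h1, h2, hl, htake]
    rfl
  rw [hfreq]
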